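-- pv_equiv track=rewrite | github.com/zero0205/Algorithm_Python | 코테/2022 NC SOFT 여름인턴/1.py | solution
-- ===== SOURCE A (Python) =====
-- from collections import defaultdict
-- import heapq
--
-- def solution(movie):
--     answer = []
--     movie_dict = defaultdict(int)
--
--     # 영화 개수 카운트
--     for m in movie:
--         movie_dict[m] += 1
--
--     # 힙큐 이용하여 정렬
--     q = []
--     for name, cnt in movie_dict.items():
--         heapq.heappush(q, (-cnt, name))
--     # 많은 영화부터 정답 배열에 담기
--     while q:
--         answer.append(heapq.heappop(q)[1])
--
--     return answer
-- ===== SOURCE B (Python) =====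
-- def solution(movie):
--     counts = {}
--     for m in movie:
--         counts[m] = counts.get(m, 0) + 1
--     ordered = sorted(counts.items(), key=lambda kv: (-kv[1], kv[0]))
--     return [name for name, _ in ordered]
-- ===== Notes on version B (the rewrite author's own statement) =====
-- stated objective: simpler
-- what changed: Replaces the explicit heapq priority queue and its two push/pop loops with a single sorted() call over the count dict's items keyed by (-count, name), returning the projected names.
import Mathlib
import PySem

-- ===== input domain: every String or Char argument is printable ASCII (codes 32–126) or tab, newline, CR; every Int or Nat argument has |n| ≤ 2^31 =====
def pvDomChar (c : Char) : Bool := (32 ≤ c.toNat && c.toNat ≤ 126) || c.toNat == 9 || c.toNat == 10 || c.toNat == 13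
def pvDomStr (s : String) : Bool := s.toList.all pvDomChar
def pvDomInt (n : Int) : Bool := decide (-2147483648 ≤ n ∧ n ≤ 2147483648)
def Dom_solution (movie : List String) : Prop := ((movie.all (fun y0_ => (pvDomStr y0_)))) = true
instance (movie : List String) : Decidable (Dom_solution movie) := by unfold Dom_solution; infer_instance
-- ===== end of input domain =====

-- B replaces A's explicit heap (two push/pop loops) by one sorted() call over the count dict's items; objective: simpler.


-- ===== PORT A =====
-- CPython tuple comparison (-cnt, name) < (-cnt', name'): lexicographic on Int then String (exact on this domain).
def pvHeapLt (a b : Int × String) : Bool :=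
  decide (a.1 < b.1) || (!decide (b.1 < a.1) && decide (a.2 < b.2))

-- heapq modelled by hand as an ordered list: heappush = ordered insert, heappop = take the head.
-- Exact here: A only pushes everything and then pops everything, and a heap's full pop sequence is
-- exactly the nondecreasing order of the pushed multiset (equal tuples are identical values).
def pvHeapPush (q : List (Int × String)) (item : Int × String) : List (Int × String) :=
  PySem.List.insertBy pvHeapLt item q

-- 'while q: answer.append(heapq.heappop(q)[1])'
def pvHeapPopLoop : List (Int × String) → List String → List String
  | [], answer => answer
  | x :: t, answer => pvHeapPopLoop t (answer ++ [x.2])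

def solution (movie : List String) : List String :=
  let movie_dict : PySem.Dict String Int :=
    movie.foldl (fun d m => d.modify m 0 (· + 1)) PySem.Dict.empty
  let q : List (Int × String) :=
    movie_dict.items.foldl (fun q p => pvHeapPush q (-p.2, p.1)) []
  pvHeapPopLoop q []

-- ===== PORT B =====
def solution_alt (movie : List String) : List String :=
  let counts : PySem.Dict String Int :=
    movie.foldl (fun d m => d.insert m (d.getD m 0 + 1)) PySem.Dict.empty
  (PySem.List.sorted2 counts.items (fun kv => -kv.2) (fun kv => kv.1)).map (fun kv => kv.1)

-- ===== PRECONDITION & SPEC =====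
def Spec_solution (movie : List String) (out : List String) : Prop := out = solution_alt movie
instance (movie : List String) (out : List String) : Decidable (Spec_solution movie out) := by unfold Spec_solution; infer_instance

-- ===== CLAIM (what is proved, stated in full; the proofs are below) =====
def Claim_equal_solution : Prop := ∀ (movie : List String), Dom_solution movie → Spec_solution movie (solution movie)

-- ===== LEMMAS AND PROOFS =====

-- the lexicographic key both programs order by
def pvKey (p : Int × String) : Int ×ₗ String := toLex p

lemma pvHeapLt_eq : pvHeapLt = fun a b => decide (pvKey a < pvKey b) := by
  funext a b
  show (decide (a.1 < b.1) || (!decide (b.1 < a.1) && decide (a.2 < b.2))) = decide (toLex a < toLex b)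
  rcases lt_trichotomy a.1 b.1 with h|h|h
  · simp [Prod.Lex.toLex_lt_toLex, h]
  · simp [Prod.Lex.toLex_lt_toLex, h]
  · simp [Prod.Lex.toLex_lt_toLex, h, h.not_gt, h.ne']

lemma pv_foldl_insertBy_pairwise {α κ : Type} [LinearOrder κ] (key : α → κ)
    (l : List α) (acc : List α) (h : acc.Pairwise (fun a b => key a ≤ key b)) :
    (l.foldl (fun q x => PySem.List.insertBy (fun a b => decide (key a < key b)) x q) acc).Pairwise
      (fun a b => key a ≤ key b) := by
  induction l generalizing acc with
  | nil => exact h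
  | cons x t ih => exact ih _ (PySem.List.insertBy_pairwise_le key x acc h)

lemma pv_foldl_insertBy_perm {α : Type} (before : α → α → Bool)
    (l : List α) (acc : List α) :
    (l.foldl (fun q x => PySem.List.insertBy before x q) acc).Perm (acc ++ l) := by
  induction l generalizing acc with
  | nil => simp
  | cons x t ih =>
      refine (ih _).trans ?_
      refine ((PySem.List.insertBy_perm before x acc).append_right t).trans ?_
      simpa using List.perm_middle.symm

lemma pvHeapPopLoop_eq (q : List (Int × String)) (ans : List String) :
    pvHeapPopLoop q ans = ans ++ q.map Prod.snd := by
  induction q generalizing ans with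
  | nil => simp [pvHeapPopLoop]
  | cons x t ih => simp [pvHeapPopLoop, ih]

-- ===== VERDICT (by name: the statement is the Claim_ definition above) =====
lemma pvSorted2_lt_eq :
    (fun (a b : String × Int) => decide (-a.2 < -b.2) || (!decide (-b.2 < -a.2) && decide (a.1 < b.1)))
      = fun a b => decide (pvKey (-a.2, a.1) < pvKey (-b.2, b.1)) := by
  have h := pvHeapLt_eq
  funext a b
  exact congrFun (congrFun h (-a.2, a.1)) (-b.2, b.1)

lemma pv_main (l : List (String × Int)) :
    pvHeapPopLoop (l.foldl (fun q p => pvHeapPush q (-p.2, p.1)) []) []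
      = (PySem.List.sorted2 l (fun kv => -kv.2) (fun kv => kv.1)).map (fun kv => kv.1) := by
  have hfold : l.foldl (fun q p => pvHeapPush q (-p.2, p.1)) []
      = (l.map (fun p => (-p.2, p.1))).foldl
          (fun q x => PySem.List.insertBy (fun a b => decide (pvKey a < pvKey b)) x q) [] := by
    rw [List.foldl_map]
    simp only [pvHeapPush, pvHeapLt_eq]
  have hA_pair : (l.foldl (fun q p => pvHeapPush q (-p.2, p.1)) []).Pairwise
      (fun a b => pvKey a ≤ pvKey b) := by
    rw [hfold]
    exact pv_foldl_insertBy_pairwise pvKey _ [] (by simp)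
  have hA_perm : (l.foldl (fun q p => pvHeapPush q (-p.2, p.1)) []).Perm
      (l.map (fun p => (-p.2, p.1))) := by
    rw [hfold]
    simpa using pv_foldl_insertBy_perm _ (l.map (fun p => (-p.2, p.1))) []
  have hzfold : PySem.List.sorted2 l (fun kv => -kv.2) (fun kv => kv.1) = l.foldl
      (fun acc x => PySem.List.insertBy
        (fun a b => decide (pvKey (-a.2, a.1) < pvKey (-b.2, b.1))) x acc) [] := by
    show l.foldl (fun acc x => PySem.List.insertBy
        (fun a b => decide (-a.2 < -b.2) || (!decide (-b.2 < -a.2) && decide (a.1 < b.1))) x acc) []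
      = _
    rw [pvSorted2_lt_eq]
  have hB_pair : ((PySem.List.sorted2 l (fun kv => -kv.2) (fun kv => kv.1)).map
      (fun p => (-p.2, p.1))).Pairwise (fun a b => pvKey a ≤ pvKey b) := by
    rw [List.pairwise_map, hzfold]
    exact pv_foldl_insertBy_pairwise (fun kv : String × Int => pvKey (-kv.2, kv.1)) _ [] (by simp)
  have hB_perm : ((PySem.List.sorted2 l (fun kv => -kv.2) (fun kv => kv.1)).map
      (fun p => (-p.2, p.1))).Perm (l.map (fun p => (-p.2, p.1))) :=
    (PySem.List.sorted2_perm l _ _ false).map _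
  have hinj : Function.Injective pvKey := fun p q h => by
    simpa [pvKey] using h
  have heq : l.foldl (fun q p => pvHeapPush q (-p.2, p.1)) []
      = (PySem.List.sorted2 l (fun kv => -kv.2) (fun kv => kv.1)).map (fun p => (-p.2, p.1)) :=
    PySem.List.eq_of_perm_of_pairwise_le_of_injective pvKey hinj
      (hA_perm.trans hB_perm.symm) hA_pair hB_pair
  rw [pvHeapPopLoop_eq, heq]
  simp [List.map_map, Function.comp]

theorem solution_spec : Claim_equal_solution := by
  intro movie _
  unfold Spec_solution solution solution_alt
  -- both counting loops build Counter(movie) (both bridge lemmas are rfl)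
  rw [PySem.Dict.foldl_insert_getD_add_one_eq_counter,
      show (movie.foldl (fun d m => d.modify m 0 (· + 1)) PySem.Dict.empty)
        = PySem.Dict.counter movie from rfl]
  exact pv_main ((PySem.Dict.counter movie).items)
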